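-- pv_equiv track=rewrite | github.com/HaShira-Lab/torah-phonetic-architecture | src/analyses/layer_b/layer_b_anchor_participation.py | tokenize_word
-- ===== SOURCE A (Python) =====
-- DIGRAPHS = ("sh", "kh", "ts")
--
-- def tokenize_word(word: str):
--     out = []
--     i = 0
--     while i < len(word):
--         two = word[i:i + 2]
--         if two in DIGRAPHS:
--             out.append(two)
--             i += 2
--         else:
--             out.append(word[i])
--             i += 1
--     return out
-- ===== SOURCE B (Python) =====
-- DIGRAPHS = ("sh", "kh", "ts")
--
-- def tokenize_word(word: str):
--     out = []
--     prev = None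
--     for c in word:
--         if prev is not None and prev + c in DIGRAPHS:
--             out.append(prev + c)
--             prev = None
--         else:
--             if prev is not None:
--                 out.append(prev)
--             prev = c
--     if prev is not None:
--         out.append(prev)
--     return out
-- ===== Notes on version B (the rewrite author's own statement) =====
-- stated objective: alternative
-- what changed: Replaced the index-walking loop with slicing and lookahead by a single left-to-right fold over the characters that keeps one pending character of state and emits a digraph or the pending single character as it goes.
import Mathlib
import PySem

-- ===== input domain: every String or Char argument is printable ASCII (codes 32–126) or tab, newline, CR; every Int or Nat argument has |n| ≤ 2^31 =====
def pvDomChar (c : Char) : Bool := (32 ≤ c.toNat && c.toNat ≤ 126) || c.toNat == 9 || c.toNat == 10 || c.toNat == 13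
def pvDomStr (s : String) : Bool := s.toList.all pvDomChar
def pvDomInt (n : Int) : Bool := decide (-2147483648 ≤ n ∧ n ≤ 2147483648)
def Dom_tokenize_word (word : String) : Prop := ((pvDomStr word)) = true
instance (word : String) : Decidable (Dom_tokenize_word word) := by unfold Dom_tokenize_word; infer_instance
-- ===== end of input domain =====

-- B replaces A's index-walking loop (slice lookahead) by a one-pass fold with a pending-character state; alternative decomposition, same cost.


-- ===== PORT A =====
-- A's while loop: index i walks the word; word[i:i+2] is (cs.drop i).take 2 (exact: i ≥ 0 and
-- the stop i+2 ≥ i, so Python's slice is exactly take 2 of drop i); word[i] is cs[i] (i < len).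
def tokenize_word_go (cs : List Char) (i : Nat) (out : List String) : List String :=
  if h : i < cs.length then
    let two := String.ofList ((cs.drop i).take 2)
    if two = "sh" ∨ two = "kh" ∨ two = "ts" then
      tokenize_word_go cs (i + 2) (out ++ [two])
    else
      tokenize_word_go cs (i + 1) (out ++ [String.ofList [cs[i]]])
  else out
termination_by cs.length - i

def tokenize_word (word : String) : List String :=
  tokenize_word_go word.toList 0 []

-- ===== PORT B =====
-- B's loop body: state is (out, prev); one character consumed per step.
def tokenize_word_alt_step (st : List String × Option Char) (c : Char) : List String × Option Char :=
  match st with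
  | (out, some p) =>
      if String.ofList [p, c] = "sh" ∨ String.ofList [p, c] = "kh" ∨ String.ofList [p, c] = "ts" then
        (out ++ [String.ofList [p, c]], none)
      else
        (out ++ [String.ofList [p]], some c)
  | (out, none) => (out, some c)

def tokenize_word_alt (word : String) : List String :=
  match word.toList.foldl tokenize_word_alt_step ([], none) with
  | (out, some p) => out ++ [String.ofList [p]]
  | (out, none) => out

-- ===== PRECONDITION & SPEC =====
def Spec_tokenize_word (word : String) (out : List String) : Prop := out = tokenize_word_alt word
instance (word : String) (out : List String) : Decidable (Spec_tokenize_word word out) := by unfold Spec_tokenize_word; infer_instance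

-- ===== CLAIM (what is proved, stated in full; the proofs are below) =====
def Claim_equal_tokenize_word : Prop := ∀ (word : String), Dom_tokenize_word word → Spec_tokenize_word word (tokenize_word word)

-- ===== LEMMAS AND PROOFS =====

-- canonical recursive tokenization both ports are reduced to
def pvCanon : List Char → List String
  | [] => []
  | [a] => [String.ofList [a]]
  | a :: b :: rest =>
      if String.ofList [a, b] = "sh" ∨ String.ofList [a, b] = "kh" ∨ String.ofList [a, b] = "ts" then
        String.ofList [a, b] :: pvCanon rest
      else
        String.ofList [a] :: pvCanon (b :: rest)

-- finishing B's fold state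
def pvFinish : List String × Option Char → List String
  | (out, some p) => out ++ [String.ofList [p]]
  | (out, none) => out

lemma tokenize_word_go_eq (cs : List Char) (i : Nat) (out : List String) :
    tokenize_word_go cs i out = out ++ pvCanon (cs.drop i) := by
  induction hfuel : cs.length - i using Nat.strong_induction_on generalizing i out with
  | _ n ih =>
    subst hfuel
    rw [tokenize_word_go]
    by_cases h : i < cs.length
    · simp only [h, dif_pos]
      have hd : cs.drop i = cs[i] :: cs.drop (i + 1) := List.drop_eq_getElem_cons h
      by_cases h1 : i + 1 < cs.length
      · have hd1 : cs.drop (i + 1) = cs[i + 1] :: cs.drop (i + 2) :=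
          List.drop_eq_getElem_cons h1
        rw [hd, hd1]
        simp only [List.take_succ_cons, List.take_zero]
        split_ifs with hdig
        · rw [ih (cs.length - (i + 2)) (by omega) (i + 2) _ rfl]
          rw [pvCanon, if_pos hdig, List.append_assoc]; rfl
        · rw [ih (cs.length - (i + 1)) (by omega) (i + 1) _ rfl]
          rw [hd1, pvCanon, if_neg hdig, List.append_assoc]; rfl
      · have hnil : cs.drop (i + 1) = [] := List.drop_eq_nil_of_le (by omega)
        rw [hd, hnil]
        have hone : ¬ (String.ofList [cs[i]] = "sh" ∨ String.ofList [cs[i]] = "kh" ∨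
            String.ofList [cs[i]] = "ts") := by
          intro hc
          rcases hc with hc | hc | hc <;>
          · have hlen := congrArg (fun s => s.toList.length) hc
            simp at hlen
        simp only [List.take_succ_cons, List.take_nil, hone, if_false]
        rw [ih (cs.length - (i + 1)) (by omega) (i + 1) _ rfl, hnil]
        simp [pvCanon]
    · simp only [h, dif_neg, not_false_iff]
      rw [List.drop_eq_nil_of_le (by omega)]
      simp [pvCanon]

lemma pvCanon_cons_cons (a b : Char) (rest : List Char) :
    pvCanon (a :: b :: rest) =
      if String.ofList [a, b] = "sh" ∨ String.ofList [a, b] = "kh" ∨ String.ofList [a, b] = "ts"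
      then String.ofList [a, b] :: pvCanon rest
      else String.ofList [a] :: pvCanon (b :: rest) := rfl

lemma tokenize_word_fold_eq (l : List Char) :
    ∀ (out : List String) (prev : Option Char),
      pvFinish (l.foldl tokenize_word_alt_step (out, prev)) =
        out ++ (match prev with
                | none => pvCanon l
                | some p => pvCanon (p :: l)) := by
  induction l with
  | nil =>
    intro out prev
    cases prev <;> simp [pvFinish, pvCanon]
  | cons c rest ih =>
    intro out prev
    cases prev with
    | none =>
      simp only [List.foldl_cons, tokenize_word_alt_step]
      exact ih out (some c)
    | some p =>
      simp only [List.foldl_cons, tokenize_word_alt_step]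
      split_ifs with hdig
      · rw [ih (out ++ [String.ofList [p, c]]) none, pvCanon_cons_cons, if_pos hdig]
        simp
      · rw [ih (out ++ [String.ofList [p]]) (some c), pvCanon_cons_cons, if_neg hdig]
        simp

-- ===== VERDICT (by name: the statement is the Claim_ definition above) =====
theorem tokenize_word_spec : Claim_equal_tokenize_word := by
  intro word _
  unfold Spec_tokenize_word tokenize_word tokenize_word_alt
  rw [tokenize_word_go_eq]
  have h := tokenize_word_fold_eq word.toList [] none
  simp only [pvFinish] at h
  cases hst : word.toList.foldl tokenize_word_alt_step ([], none) with
  | mk o pr =>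
    rw [hst] at h
    cases pr <;> simpa using h.symm
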